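-- pv_equiv track=rewrite | github.com/alexandraback/datacollection | solutions_5636311922769920_1/Python/RedJay/d.py | getTiles
-- ===== SOURCE A (Python) =====
-- from functools import reduce
--
-- def getTiles(k,c,s):
--     if c*s < k:
--         return "IMPOSSIBLE"
--     else:
--         retvals = []
--         alltiles = list(range(1,k+1))
--         for i in range(0,k,c):
--             sometiles = alltiles[i:i+c]
--             newtile = 1 # each tile must have at least one
--             for j in range(len(sometiles)):
--                 newtile += k**j * (sometiles[j] - 1)
--             retvals.append(newtile)
--         return reduce(lambda x,y: x + " " + y, map(str, retvals))
-- ===== SOURCE B (Python) =====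
-- def getTiles(k, c, s):
--     if c * s < k:
--         return "IMPOSSIBLE"
--     parts = []
--     for i in range(0, k, c):
--         m = max(0, min(c, k - i))  # group length; group values are i+1 .. i+m
--         if k == 1:
--             S0 = m
--             S1 = m * (m - 1) // 2
--         else:
--             S0 = (k**m - 1) // (k - 1)                                   # sum_{j<m} k^j
--             S1 = (k - m * k**m + (m - 1) * k**(m + 1)) // ((k - 1)**2)   # sum_{j<m} j*k^j
--         parts.append(str(1 + i * S0 + S1))
--     return " ".join(parts)
-- ===== Notes on version B (the rewrite author's own statement) =====
-- stated objective: faster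
-- what changed: Since each group consists of consecutive integers i+1..i+m, B computes its code in closed form as 1 + i*S0 + S1 using exact integer division for the geometric sums S0 = (k^m-1)//(k-1) and S1 = (k - m*k^m + (m-1)*k^(m+1))//(k-1)^2 (triangular numbers when k=1), eliminating A's inner per-tile loop, the materialised tile list and its slices, and assembles the result with ' '.join instead of reduce.
import Mathlib
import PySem

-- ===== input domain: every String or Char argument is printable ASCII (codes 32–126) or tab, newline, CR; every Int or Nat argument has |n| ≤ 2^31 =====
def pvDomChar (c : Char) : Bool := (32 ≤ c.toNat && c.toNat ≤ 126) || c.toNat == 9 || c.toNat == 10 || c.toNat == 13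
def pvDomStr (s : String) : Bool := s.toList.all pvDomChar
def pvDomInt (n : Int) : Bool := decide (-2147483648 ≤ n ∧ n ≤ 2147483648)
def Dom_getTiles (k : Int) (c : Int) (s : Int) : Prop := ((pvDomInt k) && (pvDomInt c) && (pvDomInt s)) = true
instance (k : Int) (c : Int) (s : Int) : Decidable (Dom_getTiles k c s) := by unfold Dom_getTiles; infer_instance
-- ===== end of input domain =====

-- B replaces A's inner per-tile encoding loop (summing k^j*(tile-1) over each group) by a
-- closed-form computation: each group is consecutive integers, so its code is
-- 1 + i*S0 + S1 with S0, S1 the geometric sums in exact integer division (objective: faster; measured faster in a timing run).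


-- ===== PORT A =====
def getTiles (k : Int) (c : Int) (s : Int) : String :=
  if c * s < k then "IMPOSSIBLE"
  else
    let alltiles := PySem.List.pyRange 1 (k + 1) 1
    let retvals : List Int :=
      (PySem.List.pyRange 0 k c).foldl (fun retvals i =>
        let sometiles := PySem.List.slice alltiles (some i) (some (i + c))
        let newtile :=
          (PySem.List.pyRange 0 (PySem.List.len sometiles) 1).foldl
            (fun nt j => nt + k ^ j.toNat * (PySem.List.pyGetD sometiles j 0 - 1)) 1
        retvals ++ [newtile]) []
    -- reduce(lambda x,y: x + " " + y, map(str, retvals)); on an empty list reduce raises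
    -- TypeError, which Pre_getTiles excludes
    match retvals.map PySem.Int.toStr with
    | [] => ""
    | x :: rest => rest.foldl (fun x y => x ++ " " ++ y) x

-- ===== PORT B =====
def getTiles_alt (k : Int) (c : Int) (s : Int) : String :=
  if c * s < k then "IMPOSSIBLE"
  else
    let parts : List String :=
      (PySem.List.pyRange 0 k c).foldl (fun parts i =>
        let m : Int := max 0 (min c (k - i))
        let S : Int × Int :=
          if k = 1 then (m, PySem.Int.floordiv (m * (m - 1)) 2)
          else (PySem.Int.floordiv (k ^ m.toNat - 1) (k - 1),
                PySem.Int.floordiv (k - m * k ^ m.toNat + (m - 1) * k ^ (m.toNat + 1)) ((k - 1) ^ 2))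
        parts ++ [PySem.Int.toStr (1 + i * S.1 + S.2)]) []
    PySem.Str.join " " parts

-- ===== PRECONDITION & SPEC =====
-- Pre_ excludes exactly the inputs where A raises: c = 0 makes range(0,k,0) raise ValueError,
-- and an empty range(0,k,c) (c>0 with k≤0, or c<0 with k≥0) makes reduce raise TypeError.
def Pre_getTiles (k : Int) (c : Int) (s : Int) : Prop :=
  c * s < k ∨ ((0 < c ∧ 0 < k) ∨ (c < 0 ∧ k < 0))
instance (k : Int) (c : Int) (s : Int) : Decidable (Pre_getTiles k c s) := by
  unfold Pre_getTiles; infer_instance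

def pvWitness_getTiles : Int × Int × Int := (3, 2, 2)

def Spec_getTiles (k : Int) (c : Int) (s : Int) (out : String) : Prop := out = getTiles_alt k c s
instance (k : Int) (c : Int) (s : Int) (out : String) : Decidable (Spec_getTiles k c s out) := by
  unfold Spec_getTiles; infer_instance

-- ===== CLAIM (what is proved, stated in full; the proofs are below) =====
def Claim_equal_getTiles : Prop :=
  ∀ (k : Int) (c : Int) (s : Int), Dom_getTiles k c s → Pre_getTiles k c s →
    Spec_getTiles k c s (getTiles k c s)

-- ===== LEMMAS AND PROOFS =====

-- sum_{j<n} k^j and sum_{j<n} j*k^j, as list sums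
def pvG0 (k : Int) (n : Nat) : Int := ((List.range n).map (fun j => k ^ j)).sum
def pvG1 (k : Int) (n : Nat) : Int := ((List.range n).map (fun (j : Nat) => (j : Int) * k ^ j)).sum

theorem pvG0_mul (k : Int) (n : Nat) : (k - 1) * pvG0 k n = k ^ n - 1 := by
  induction n with
  | zero => simp [pvG0]
  | succ m ih =>
    unfold pvG0 at *
    rw [List.range_succ, List.map_append, List.sum_append]
    rw [mul_add, ih]
    simp [pow_succ]
    ring

theorem pvG1_mul (k : Int) (n : Nat) :
    (k - 1) ^ 2 * pvG1 k n = k - (n : Int) * k ^ n + ((n : Int) - 1) * k ^ (n + 1) := by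
  induction n with
  | zero => simp [pvG1]
  | succ m ih =>
    unfold pvG1 at *
    rw [List.range_succ, List.map_append, List.sum_append]
    rw [mul_add, ih]
    push_cast
    simp [pow_succ]
    ring

theorem pvG0_one (n : Nat) : pvG0 1 n = (n : Int) := by
  induction n with
  | zero => simp [pvG0]
  | succ m ih =>
    unfold pvG1 at *
    unfold pvG0 at *
    rw [List.range_succ, List.map_append, List.sum_append, ih]
    push_cast
    simp

theorem pvG1_one_mul (n : Nat) : 2 * pvG1 1 n = (n : Int) * ((n : Int) - 1) := by
  induction n with
  | zero => simp [pvG1]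
  | succ m ih =>
    unfold pvG1 at *
    rw [List.range_succ, List.map_append, List.sum_append]
    rw [mul_add, ih]
    push_cast
    simp
    ring

theorem pv_fd_exact (d q : Int) (h : d ≠ 0) : PySem.Int.floordiv (d * q) d = q := by
  simp [PySem.Int.floordiv]
  rw [mul_comm]
  exact Int.mul_fdiv_cancel q h

theorem pv_sum_split (k i : Int) (n : Nat) :
    ((List.range n).map (fun (j : Nat) => k ^ j * (i + (j : Int)))).sum = i * pvG0 k n + pvG1 k n := by
  induction n with
  | zero => simp [pvG0, pvG1]
  | succ m ih =>
    unfold pvG0 pvG1 at *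
    rw [List.range_succ, List.map_append, List.sum_append, ih,
      List.map_append, List.sum_append, List.map_append, List.sum_append]
    simp
    ring

theorem drop_pyRange_one (n : Nat) (a b : Int) :
    (PySem.List.pyRange a b 1).drop n = PySem.List.pyRange (a + n) b 1 := by
  induction n generalizing a with
  | zero => simp
  | succ m ih =>
    by_cases h : b ≤ a
    · rw [PySem.List.pyRange_one_eq_nil h, PySem.List.pyRange_one_eq_nil (by push_cast; omega)]
      simp
    · rw [PySem.List.pyRange_one_cons (by omega), List.drop_succ_cons, ih (a + 1)]
      congr 1
      push_cast
      ring

theorem take_pyRange_one (n : Nat) (a b : Int) :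
    (PySem.List.pyRange a b 1).take n = PySem.List.pyRange a (min (a + n) b) 1 := by
  induction n generalizing a with
  | zero =>
    rw [List.take_zero, PySem.List.pyRange_one_eq_nil (by push_cast; omega)]
  | succ m ih =>
    by_cases h : b ≤ a
    · rw [PySem.List.pyRange_one_eq_nil h, PySem.List.pyRange_one_eq_nil (by omega)]
      simp
    · rw [PySem.List.pyRange_one_cons (by omega), List.take_succ_cons, ih (a + 1),
        PySem.List.pyRange_one_cons (a := a) (by push_cast; omega)]
      congr 2
      push_cast
      omega

theorem slice_range (k c i : Int) (hi : 0 ≤ i) (hc : 0 ≤ c) :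
    PySem.List.slice (PySem.List.pyRange 1 (k + 1) 1) (some i) (some (i + c))
      = PySem.List.pyRange (i + 1) (min (i + c) k + 1) 1 := by
  rw [PySem.List.slice_toNat _ hi (by omega), drop_pyRange_one, take_pyRange_one]
  congr 1 <;> omega

-- A's inner loop over the group i+1 .. i+n, in closed form
theorem innerA_closed (k i : Int) (n : Nat) :
    (PySem.List.pyRange 0 (PySem.List.len (PySem.List.pyRange (i + 1) (i + 1 + n) 1)) 1).foldl
        (fun nt j => nt + k ^ j.toNat * (PySem.List.pyGetD (PySem.List.pyRange (i + 1) (i + 1 + n) 1) j 0 - 1)) 1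
      = 1 + (i * pvG0 k n + pvG1 k n) := by
  rw [PySem.List.foldl_add
    (g := fun j => k ^ j.toNat * (PySem.List.pyGetD (PySem.List.pyRange (i + 1) (i + 1 + n) 1) j 0 - 1))]
  rw [PySem.List.len_eq, PySem.List.length_pyRange_one]
  have hn : ((i + 1 + n - (i + 1)).toNat) = n := by omega
  rw [hn, PySem.List.pyRange_zero_natCast, List.map_map]
  congr 1
  rw [← pv_sum_split k i n]
  refine congrArg List.sum (List.map_congr_left ?_)
  intro j hj
  have hjn : j < n := List.mem_range.mp hj
  simp only [Function.comp]
  rw [PySem.List.pyGetD_natCast]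
  have hlen : j < (PySem.List.pyRange (i + 1) (i + 1 + n) 1).length := by
    rw [PySem.List.length_pyRange_one]; omega
  rw [List.getD_eq_getElem _ _ hlen, PySem.List.getElem_pyRange_one]
  rw [Int.toNat_natCast]
  ring

-- B's per-group value in closed form (k ≠ 1 branch)
theorem pvB_val (k i m : Int) (n : Nat) (hn : (n : Int) = m) (hk : k ≠ 1) :
    1 + i * PySem.Int.floordiv (k ^ n - 1) (k - 1)
      + PySem.Int.floordiv (k - m * k ^ n + (m - 1) * k ^ (n + 1)) ((k - 1) ^ 2)
    = 1 + (i * pvG0 k n + pvG1 k n) := by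
  have hd : k - 1 ≠ 0 := sub_ne_zero.mpr hk
  have h1 : k ^ n - 1 = (k - 1) * pvG0 k n := (pvG0_mul k n).symm
  have h2 : k - m * k ^ n + (m - 1) * k ^ (n + 1) = (k - 1) ^ 2 * pvG1 k n := by
    rw [pvG1_mul, ← hn]
  rw [h1, h2, pv_fd_exact _ _ hd, pv_fd_exact _ _ (pow_ne_zero 2 hd)]
  ring

theorem pvB_val_one (i m : Int) (n : Nat) (hn : (n : Int) = m) :
    1 + i * m + PySem.Int.floordiv (m * (m - 1)) 2
    = 1 + (i * pvG0 1 n + pvG1 1 n) := by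
  have h2 : m * (m - 1) = 2 * pvG1 1 n := by rw [pvG1_one_mul, hn]
  rw [h2, pv_fd_exact _ _ (by norm_num), pvG0_one, hn]
  ring

theorem join_chars_assoc (sep p q : List Char) (rest : List (List Char)) :
    PySem.Chars.join sep ((p ++ sep ++ q) :: rest)
      = p ++ sep ++ PySem.Chars.join sep (q :: rest) := by
  cases rest with
  | nil => rw [PySem.Chars.join_singleton, PySem.Chars.join_singleton]
  | cons r rs =>
    rw [PySem.Chars.join_cons_cons, PySem.Chars.join_cons_cons]
    simp

theorem fold_join (t : List String) (h : String) :
    t.foldl (fun x y => x ++ " " ++ y) h = PySem.Str.join " " (h :: t) := by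
  induction t generalizing h with
  | nil =>
    rw [List.foldl_nil]
    apply String.toList_injective
    rw [PySem.Str.toList_join, List.map_cons, List.map_nil, PySem.Chars.join_singleton]
  | cons y t ih =>
    rw [List.foldl_cons, ih]
    apply String.toList_injective
    rw [PySem.Str.toList_join, PySem.Str.toList_join, List.map_cons, List.map_cons, List.map_cons]
    have : (h ++ " " ++ y).toList = h.toList ++ (" " : String).toList ++ y.toList := by simp
    rw [this, join_chars_assoc, PySem.Chars.join_cons_cons]

theorem pyRange_ne_nil_of_neg (a b s : Int) (h : b < a) (hs : s < 0) :
    PySem.List.pyRange a b s ≠ [] := by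
  unfold PySem.List.pyRange
  rw [if_neg (by omega : ¬ s = 0)]
  simp only [ne_eq, List.map_eq_nil_iff, List.range_eq_nil]
  rw [if_neg (by omega : ¬ 0 < s), if_pos h]
  intro hcount
  have h1 : 1 ≤ (a - b + -s - 1) / -s := by
    rw [Int.le_ediv_iff_mul_le (by omega)]
    omega
  omega

theorem reduce_join (ps : List String) :
    ps ≠ [] →
    (match ps with
      | [] => ""
      | x :: rest => rest.foldl (fun x y => x ++ " " ++ y) x) = PySem.Str.join " " ps := by
  cases ps with
  | nil => exact fun h => absurd rfl h
  | cons x rest => exact fun _ => fold_join rest x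

-- ===== VERDICT (by name: the statement is the Claim_ definition above) =====
theorem getTiles_spec : Claim_equal_getTiles := by
  intro k c s _ hpre
  unfold Spec_getTiles getTiles getTiles_alt
  by_cases hlt : c * s < k
  · simp [hlt]
  · simp only [if_neg hlt]
    rw [PySem.List.foldl_append_singleton_eq_map, PySem.List.foldl_append_singleton_eq_map,
      List.nil_append, List.nil_append, List.map_map]
    have hkc : (0 < c ∧ 0 < k) ∨ (c < 0 ∧ k < 0) := hpre.resolve_left hlt
    have hpt : ∀ i ∈ PySem.List.pyRange 0 k c,
        (PySem.Int.toStr ∘ fun i =>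
          List.foldl
            (fun nt j =>
              nt +
                k ^ j.toNat *
                  (PySem.List.pyGetD (PySem.List.slice (PySem.List.pyRange 1 (k + 1)) (some i) (some (i + c))) j 0 - 1))
            1
            (PySem.List.pyRange 0
              (PySem.List.len (PySem.List.slice (PySem.List.pyRange 1 (k + 1)) (some i) (some (i + c)))))) i
        = (fun i =>
            PySem.Int.toStr
              (1 + i * (if k = 1 then ((max 0 (min c (k - i))), PySem.Int.floordiv ((max 0 (min c (k - i))) * ((max 0 (min c (k - i))) - 1)) 2)
                 else (PySem.Int.floordiv (k ^ (max 0 (min c (k - i))).toNat - 1) (k - 1),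
                       PySem.Int.floordiv (k - (max 0 (min c (k - i))) * k ^ (max 0 (min c (k - i))).toNat + ((max 0 (min c (k - i))) - 1) * k ^ ((max 0 (min c (k - i))).toNat + 1)) ((k - 1) ^ 2))).1
                 + (if k = 1 then ((max 0 (min c (k - i))), PySem.Int.floordiv ((max 0 (min c (k - i))) * ((max 0 (min c (k - i))) - 1)) 2)
                 else (PySem.Int.floordiv (k ^ (max 0 (min c (k - i))).toNat - 1) (k - 1),
                       PySem.Int.floordiv (k - (max 0 (min c (k - i))) * k ^ (max 0 (min c (k - i))).toNat + ((max 0 (min c (k - i))) - 1) * k ^ ((max 0 (min c (k - i))).toNat + 1)) ((k - 1) ^ 2))).2)) i := by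
      intro i hi
      simp only [Function.comp]
      set m : Int := max 0 (min c (k - i)) with hm
      set n : Nat := m.toNat with hnn
      have hmn : (n : Int) = m := by
        rw [hnn]; exact Int.toNat_of_nonneg (by rw [hm]; exact le_max_left _ _)
      congr 1
      have hgrp : PySem.List.slice (PySem.List.pyRange 1 (k + 1)) (some i) (some (i + c))
          = PySem.List.pyRange (i + 1) (i + 1 + n) 1 := by
        rcases hkc with ⟨hc, hk⟩ | ⟨hc, hk⟩
        · have hi' : 0 ≤ i ∧ i < k := by
            have := (PySem.List.mem_pyRange_iff_of_pos hc i).1 hi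
            exact ⟨this.1, this.2.1⟩
          rw [slice_range k c i hi'.1 (le_of_lt hc)]
          congr 1
          have : m = min c (k - i) := by rw [hm]; omega
          omega
        · rw [PySem.List.pyRange_one_eq_nil (show (k : Int) + 1 ≤ 1 by omega)]
          have hm0 : m = 0 := by rw [hm]; omega
          rw [PySem.List.pyRange_one_eq_nil (by omega), PySem.List.slice]
          simp
      rw [hgrp, innerA_closed k i n]
      by_cases hk1 : k = 1
      · rw [if_pos hk1, hk1]
        exact (pvB_val_one i m n hmn).symm
      · rw [if_neg hk1]
        exact (pvB_val k i m n hmn hk1).symm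
    rw [List.map_congr_left hpt]
    have hne : PySem.List.pyRange 0 k c ≠ [] := by
      rcases hkc with ⟨hc, hk⟩ | ⟨hc, hk⟩
      · exact List.ne_nil_of_mem ((PySem.List.mem_pyRange_iff_of_pos hc 0).2
          ⟨le_refl 0, hk, ⟨0, by ring⟩⟩)
      · exact pyRange_ne_nil_of_neg 0 k c hk hc
    exact reduce_join _ (by simpa using hne)
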